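-- pv_equiv track=rewrite | github.com/Buscedv/abnormal-expressions | abnex.py | parse
-- ===== SOURCE A (Python) =====
-- def escape(txt):
--     escaped = ''
--
--     for char in txt:
--         if char in ['.', '$', '*', '+', '?', '(', ')', '[', '{', '\\']:
--             escaped += '\\' + char
--         else:
--             escaped += char
--
--     return escaped
--
-- def get_chars():
--     return {
--         '(': '{',
--         ')': '}',
--         '{': '(',
--         '}': ')',
--         'd': '\\d',
--         '*': '.',
--         'w': '\\w',
--         '_': '\\s',
--         ':': '\\b',
--         '->': '^',
--         '<-': '$',
--         's>': '\\A',
--         '<s': '\\Z',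
--         'w>': '\\<',
--         '<w': '\\>',
--         '!': '^',
--         '0++': '*',
--         '1++': '+',
--         '0+': '?',
--         'c': '\\c',
--         'x': '\\x',
--         'o': '\\o',
--     }
--
-- def transpile(char, is_not):
--     try:
--         return get_chars()[char] if not is_not else get_chars()[char].upper()
--     except Exception:
--         return char
--
-- def parse(expr):
--     regex = ''
--     tmp = ''
--
--     is_exact = False
--     is_skip = False
--     is_not = False
--     is_quantifier = False
--
--     for index, char in enumerate(expr):
--         if is_quantifier:
--             tmp += char
--             try:
--                 if expr[index + 1] != '+':
--                     check = True
--                 else: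
--                     check = False
--             except IndexError:
--                 check = True
--             if check:
--                 regex += transpile(tmp, is_not)
--                 tmp = ''
--                 is_quantifier = False
--         elif is_skip:
--             is_skip = False
--         elif is_exact:
--             if char == '"':
--                 is_exact = False
--                 tmp = escape(tmp)
--                 regex += tmp
--                 tmp = ''
--             else:
--                 tmp += char
--         elif char not in [' ', '\n', '\t']:
--             if char == '"':
--                 is_exact = True
--             elif char == '!' and expr[index - 1] != '[':
--                 is_not = True
--             elif char in ['0', '1'] and expr[index + 1] == '+':
--                 is_quantifier = True
--                 tmp = char
--             else:
--                 if index < len(expr)-1: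
--                     next_up = expr[index + 1]
--                     if char in ['-', 's', 'w'] and next_up == '>' or char == '<' and next_up in ['-', 's', 'w']:
--                         is_skip = True
--                         regex += transpile(char + next_up, is_not)
--                     else:
--                         regex += transpile(char, is_not)
--                 else:
--                     regex += transpile(char, is_not)
--
--     return regex
-- ===== SOURCE B (Python) =====
-- # Index-driven tokenizing rewrite: one while loop that jumps over whole tokens
-- # (quoted literals, '+' runs, two-char arrows) instead of A's per-character
-- # state machine with is_exact/is_skip/is_quantifier flags.
--
-- def escape(txt):
--     return ''.join('\\' + c if c in '.$*+?()[{\\' else c for c in txt)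
--
--
-- def transpile(token, is_not):
--     chars = {
--         '(': '{', ')': '}', '{': '(', '}': ')', 'd': '\\d', '*': '.',
--         'w': '\\w', '_': '\\s', ':': '\\b', '->': '^', '<-': '$',
--         's>': '\\A', '<s': '\\Z', 'w>': '\\<', '<w': '\\>', '!': '^',
--         '0++': '*', '1++': '+', '0+': '?', 'c': '\\c', 'x': '\\x', 'o': '\\o',
--     }
--     if token in chars:
--         r = chars[token]
--         return r.upper() if is_not else r
--     return token
--
--
-- def parse(expr):
--     n = len(expr)
--     out = ''
--     is_not = False
--     i = 0
--     while i < n: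
--         c = expr[i]
--         if c in ' \n\t':
--             i += 1
--         elif c == '"':
--             j = i + 1
--             content = ''
--             while j < n and expr[j] != '"':
--                 content += expr[j]
--                 j += 1
--             if j == n:  # unterminated literal: contributes nothing
--                 break
--             out += escape(content)
--             i = j + 1
--         elif c == '!' and expr[i - 1] != '[':
--             is_not = True
--             i += 1
--         elif c in '01' and i + 1 < n and expr[i + 1] == '+':
--             token = c
--             j = i + 1
--             while j < n and expr[j] == '+':
--                 token += '+'
--                 j += 1
--             out += transpile(token, is_not)
--             i = j
--         elif i + 1 < n and (c in '-sw' and expr[i + 1] == '>' or c == '<' and expr[i + 1] in '-sw'):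
--             out += transpile(c + expr[i + 1], is_not)
--             i += 2
--         else:
--             out += transpile(c, is_not)
--             i += 1
--     return out
-- ===== Notes on version B (the rewrite author's own statement) =====
-- stated objective: alternative
-- what changed: A's single for-loop with four carried state flags (is_exact/is_skip/is_not/is_quantifier) and a tmp buffer is replaced by an index-driven while loop that consumes whole tokens at once: a quoted literal is scanned to its closing quote, a '0'/'1' quantifier swallows its entire '+' run, and two-char arrows advance the index by 2, so no per-character mode flags or buffer survive across iterations.
import Mathlib
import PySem

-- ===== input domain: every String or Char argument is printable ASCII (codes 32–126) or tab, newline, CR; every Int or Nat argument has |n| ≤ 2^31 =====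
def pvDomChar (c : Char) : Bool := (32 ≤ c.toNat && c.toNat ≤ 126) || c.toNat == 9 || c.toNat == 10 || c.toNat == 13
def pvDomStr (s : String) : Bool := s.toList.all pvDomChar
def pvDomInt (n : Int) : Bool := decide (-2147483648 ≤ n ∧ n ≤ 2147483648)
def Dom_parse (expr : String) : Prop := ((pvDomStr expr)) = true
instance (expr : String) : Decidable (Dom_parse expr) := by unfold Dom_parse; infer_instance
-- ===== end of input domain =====

-- B rewrites A's per-character state machine (is_exact/is_skip/is_quantifier flags) as an
-- index-driven while loop that jumps over whole tokens; return values agree on Pre_parse.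

-- ===== PORT A =====

-- characters escape() protects
def pvEscTable : List Char := ['.', '$', '*', '+', '?', '(', ')', '[', '{', '\\']

-- port of A's escape: a for-loop accumulating into a string
def pvEscapeA (txt : List Char) : List Char :=
  txt.foldl (fun acc c => if c ∈ pvEscTable then acc ++ ['\\', c] else acc ++ [c]) []

-- get_chars(): the dict literal (shared by both ports; it is the same literal in both Pythons)
def pvChars : PySem.Dict (List Char) (List Char) :=
  PySem.Dict.ofList
    [ (['('], ['{']), ([')'], ['}']), (['{'], ['(']), (['}'], [')'])
    , (['d'], ['\\', 'd']), (['*'], ['.']), (['w'], ['\\', 'w']), (['_'], ['\\', 's'])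
    , ([':'], ['\\', 'b']), (['-', '>'], ['^']), (['<', '-'], ['$'])
    , (['s', '>'], ['\\', 'A']), (['<', 's'], ['\\', 'Z'])
    , (['w', '>'], ['\\', '<']), (['<', 'w'], ['\\', '>'])
    , (['!'], ['^']), (['0', '+', '+'], ['*']), (['1', '+', '+'], ['+']), (['0', '+'], ['?'])
    , (['c'], ['\\', 'c']), (['x'], ['\\', 'x']), (['o'], ['\\', 'o']) ]

-- port of A's transpile: dict lookup, .upper() when is_not, KeyError caught → the token itself
def pvTranspileA (tok : List Char) (isNot : Bool) : List Char :=
  match pvChars.get? tok with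
  | some v => if isNot then PySem.Chars.upper v else v
  | none => tok

def pvWS : List Char := [' ', '\n', '\t']

-- A's  try: check = (expr[index+1] != '+')  except IndexError: check = True
def pvQuantCheck (l : List Char) (i : Int) : Bool :=
  match PySem.List.pyGet? l (i + 1) with
  | some ch => ch != '+'
  | none => true

-- the loop state of A's for-loop: (regex, tmp, is_exact, is_skip, is_not, is_quantifier)
structure PvStA where
  regex : List Char
  tmp : List Char
  isExact : Bool
  isSkip : Bool
  isNot : Bool
  isQuant : Bool
deriving Repr, DecidableEq

-- one iteration of A's for-loop body at (index, char); branch for branch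
def pvStepA (l : List Char) (st : PvStA) (i : Int) (c : Char) : PvStA :=
  if st.isQuant then
    let tmp := st.tmp ++ [c]
    if pvQuantCheck l i then
      { st with regex := st.regex ++ pvTranspileA tmp st.isNot, tmp := [], isQuant := false }
    else { st with tmp := tmp }
  else if st.isSkip then { st with isSkip := false }
  else if st.isExact then
    if c = '"' then { st with isExact := false, regex := st.regex ++ pvEscapeA st.tmp, tmp := [] }
    else { st with tmp := st.tmp ++ [c] }
  else if c ∉ pvWS then
    if c = '"' then { st with isExact := true }
    else if c = '!' ∧ PySem.List.pyGet? l (i - 1) ≠ some '[' then { st with isNot := true }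
    -- Python evaluates expr[index+1] here and raises IndexError past the end (excluded by Pre_);
    -- the port's condition is false there instead
    else if (c = '0' ∨ c = '1') ∧ PySem.List.pyGet? l (i + 1) = some '+' then
      { st with isQuant := true, tmp := [c] }
    else if i < PySem.List.len l - 1 then
      match PySem.List.pyGet? l (i + 1) with
      | some nu =>
        if (c ∈ ['-', 's', 'w'] ∧ nu = '>') ∨ (c = '<' ∧ nu ∈ ['-', 's', 'w']) then
          { st with isSkip := true, regex := st.regex ++ pvTranspileA [c, nu] st.isNot }
        else { st with regex := st.regex ++ pvTranspileA [c] st.isNot }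
      | none => st  -- unreachable: i < len(expr) - 1 keeps index + 1 in range
    else { st with regex := st.regex ++ pvTranspileA [c] st.isNot }
  else st

-- the for-loop over enumerate(expr)
def pvLoopA (l : List Char) : List (Int × Char) → PvStA → List Char
  | [], st => st.regex
  | (i, c) :: rest, st => pvLoopA l rest (pvStepA l st i c)

def parse (expr : String) : String :=
  String.ofList
    (pvLoopA expr.toList (PySem.List.enumerate expr.toList 0) ⟨[], [], false, false, false, false⟩)

-- ===== PORT B =====

-- Source B's escape: a join over a comprehension
def pvEscapeB (txt : List Char) : List Char :=
  txt.flatMap (fun c => if c ∈ pvEscTable then ['\\', c] else [c])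

-- Source B's transpile: membership test, then lookup
def pvTranspileB (tok : List Char) (isNot : Bool) : List Char :=
  if pvChars.contains tok then
    let r := (pvChars.get? tok).getD tok
    if isNot then PySem.Chars.upper r else r
  else tok

-- Source B's inner while loop collecting a quoted literal: returns (content, stop index).
-- (fuel only bounds the loop structurally; it is always passed enough to never run out)
def pvScanQuote (l : List Char) (j : Nat) (acc : List Char) : Nat → List Char × Nat
  | 0 => (acc, j)
  | fuel + 1 =>
    if h : j < l.length then
      if l[j] = '"' then (acc, j)
      else pvScanQuote l (j + 1) (acc ++ [l[j]]) fuel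
    else (acc, j)

-- Source B's inner while loop collecting a '+' run: returns (token, stop index)
def pvScanPlus (l : List Char) (j : Nat) (tok : List Char) : Nat → List Char × Nat
  | 0 => (tok, j)
  | fuel + 1 =>
    if h : j < l.length then
      if l[j] = '+' then pvScanPlus l (j + 1) (tok ++ ['+']) fuel
      else (tok, j)
    else (tok, j)

-- Source B's main while loop (fuel = one unit per iteration; l.length + 1 is always enough)
def pvLoopB (l : List Char) (i : Nat) (isNot : Bool) (out : List Char) : Nat → List Char
  | 0 => out
  | fuel + 1 =>
    if h : i < l.length then
      let c := l[i]
      if c ∈ pvWS then pvLoopB l (i + 1) isNot out fuel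
      else if c = '"' then
        let p := pvScanQuote l (i + 1) [] l.length
        if p.2 = l.length then out  -- unterminated literal: break
        else pvLoopB l (p.2 + 1) isNot (out ++ pvEscapeB p.1) fuel
      else if c = '!' ∧ PySem.List.pyGet? l ((i : Int) - 1) ≠ some '[' then
        pvLoopB l (i + 1) true out fuel
      else if (c = '0' ∨ c = '1') ∧ i + 1 < l.length ∧ l[i + 1]? = some '+' then
        let p := pvScanPlus l (i + 1) [c] l.length
        pvLoopB l p.2 isNot (out ++ pvTranspileB p.1 isNot) fuel
      else if i + 1 < l.length ∧
          ((c ∈ ['-', 's', 'w'] ∧ l[i + 1]? = some '>') ∨ (c = '<' ∧ l[i + 1]? ∈ [some '-', some 's', some 'w'])) then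
        pvLoopB l (i + 2) isNot (out ++ pvTranspileB [c, (l[i + 1]?).getD ' '] isNot) fuel
      else pvLoopB l (i + 1) isNot (out ++ pvTranspileB [c] isNot) fuel
    else out

def parse_alt (expr : String) : String :=
  String.ofList (pvLoopB expr.toList 0 false [] (expr.toList.length + 1))

-- ===== PRECONDITION & SPEC =====
-- Pre_ excludes exactly the inputs where A raises IndexError: expressions whose last character is
-- '0' or '1' outside a quoted literal (i.e. with an even number of '"'), where A evaluates
-- expr[index+1]; B returns there (it keeps the trailing digit as a literal character).
def Pre_parse (expr : String) : Prop :=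
  ¬ (expr.toList ≠ [] ∧
     (expr.toList.getLast? = some '0' ∨ expr.toList.getLast? = some '1') ∧
     2 ∣ expr.toList.count '"')
instance (expr : String) : Decidable (Pre_parse expr) := by unfold Pre_parse; infer_instance

def pvWitness_parse : String := "\"a\" 1++ <- !d"

def Spec_parse (expr : String) (out : String) : Prop := out = parse_alt expr
instance (expr : String) (out : String) : Decidable (Spec_parse expr out) := by unfold Spec_parse; infer_instance

-- ===== CLAIM (what is proved, stated in full; the proofs are below) =====
def Claim_equal_parse : Prop := ∀ (expr : String), Dom_parse expr → Pre_parse expr → Spec_parse expr (parse expr)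

-- ===== LEMMAS AND PROOFS =====

-- the two escapes agree
theorem pvEscape_eq (txt : List Char) : pvEscapeA txt = pvEscapeB txt := by
  have hfun : (fun (acc : List Char) (c : Char) => if c ∈ pvEscTable then acc ++ ['\\', c] else acc ++ [c])
      = fun acc c => acc ++ (if c ∈ pvEscTable then ['\\', c] else [c]) := by
    funext acc c; split <;> rfl
  rw [pvEscapeA, hfun, PySem.List.foldl_append_eq_flatMap]
  rfl

-- the two transpiles agree
theorem pvTranspile_eq (tok : List Char) (b : Bool) : pvTranspileA tok b = pvTranspileB tok b := by
  unfold pvTranspileA pvTranspileB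
  rw [PySem.Dict.contains_eq_isSome_get?]
  cases pvChars.get? tok <;> simp

-- bounds of the scan results (given sufficient fuel)
theorem pvScanQuote_bounds (l : List Char) (fuel : Nat) : ∀ (j : Nat) (acc : List Char),
    j ≤ l.length → l.length - j ≤ fuel →
    j ≤ (pvScanQuote l j acc fuel).2 ∧ (pvScanQuote l j acc fuel).2 ≤ l.length := by
  induction fuel with
  | zero => intro j acc h1 h2; simp [pvScanQuote]; omega
  | succ fuel ih =>
    intro j acc h1 h2
    rw [pvScanQuote]
    split
    · split
      · simpa using h1
      · have := ih (j + 1) (acc ++ [l[j]]) (by omega) (by omega)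
        exact ⟨by omega, this.2⟩
    · simpa using h1

theorem pvScanPlus_bounds (l : List Char) (fuel : Nat) : ∀ (j : Nat) (tok : List Char),
    j ≤ l.length → l.length - j ≤ fuel →
    j ≤ (pvScanPlus l j tok fuel).2 ∧ (pvScanPlus l j tok fuel).2 ≤ l.length := by
  induction fuel with
  | zero => intro j tok h1 h2; simp [pvScanPlus]; omega
  | succ fuel ih =>
    intro j tok h1 h2
    rw [pvScanPlus]
    split
    · split
      · have := ih (j + 1) (tok ++ ['+']) (by omega) (by omega)
        exact ⟨by omega, this.2⟩
      · simpa using h1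
    · simpa using h1

-- A's is_exact mode from position j with buffer t equals B's quote scan
theorem pvExactA (l : List Char) (fuel : Nat) : ∀ (j : Nat) (t r : List Char) (b : Bool),
    j ≤ l.length → l.length - j ≤ fuel →
    pvLoopA l (PySem.List.enumerate (l.drop j) j) ⟨r, t, true, false, b, false⟩ =
      (if (pvScanQuote l j t fuel).2 = l.length then r
       else pvLoopA l (PySem.List.enumerate (l.drop ((pvScanQuote l j t fuel).2 + 1)) ((pvScanQuote l j t fuel).2 + 1))
             ⟨r ++ pvEscapeA (pvScanQuote l j t fuel).1, [], false, false, b, false⟩) := by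
  induction fuel with
  | zero =>
    intro j t r b h1 h2
    have hj : j = l.length := by omega
    subst hj
    simp [pvScanQuote, pvLoopA, List.drop_length]
  | succ fuel ih =>
    intro j t r b h1 h2
    rw [pvScanQuote]
    by_cases hlt : j < l.length
    · rw [List.drop_eq_getElem_cons hlt, PySem.List.enumerate_cons]
      by_cases hq : l[j] = '"'
      · -- closing quote
        simp only [hlt, dif_pos, hq, if_pos]
        rw [pvLoopA]
        have hstep : pvStepA l ⟨r, t, true, false, b, false⟩ (j : Int) '"' =
            ⟨r ++ pvEscapeA t, [], false, false, b, false⟩ := by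
          simp [pvStepA]
        rw [hstep]
        have : ¬ (j = l.length) := by omega
        simp only [this, if_false]
      · simp only [hlt, dif_pos, hq, if_false]
        rw [pvLoopA]
        have hstep : pvStepA l ⟨r, t, true, false, b, false⟩ (j : Int) l[j] =
            ⟨r, t ++ [l[j]], true, false, b, false⟩ := by
          simp [pvStepA, hq]
        rw [hstep]
        have := ih (j + 1) (t ++ [l[j]]) r b (by omega) (by omega)
        rw [show ((j : Int) + 1) = ((j + 1 : Nat) : Int) by push_cast; ring]
        exact this
    · have hj : j = l.length := by omega
      subst hj
      simp [pvLoopA, List.drop_length]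


-- A's is_quantifier mode from position j (which holds a '+') with buffer t equals B's plus scan
theorem pvQuantA (l : List Char) (fuel : Nat) : ∀ (j : Nat) (t r : List Char) (b : Bool),
    j < l.length → l[j]? = some '+' → l.length - j ≤ fuel →
    pvLoopA l (PySem.List.enumerate (l.drop j) j) ⟨r, t, false, false, b, true⟩ =
      pvLoopA l (PySem.List.enumerate (l.drop (pvScanPlus l j t fuel).2) ((pvScanPlus l j t fuel).2))
        ⟨r ++ pvTranspileA (pvScanPlus l j t fuel).1 b, [], false, false, b, false⟩ := by
  induction fuel with
  | zero => intro j t r b h1 _ h3; omega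
  | succ fuel ih =>
    intro j t r b h1 h2 h3
    have hget : l[j] = '+' := by
      rw [List.getElem?_eq_getElem h1] at h2
      exact Option.some_inj.mp h2
    rw [pvScanPlus]
    simp only [h1, dif_pos, hget, if_pos]
    rw [List.drop_eq_getElem_cons h1, PySem.List.enumerate_cons, pvLoopA, hget]
    have hcast : ((j : Int) + 1) = ((j + 1 : Nat) : Int) := by push_cast; ring
    by_cases hnext : l[j + 1]? = some '+'
    · -- run continues
      have hcheck : pvQuantCheck l (j : Int) = false := by
        unfold pvQuantCheck
        rw [hcast, PySem.List.pyGet?_natCast, hnext]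
        simp
      have hstep : pvStepA l ⟨r, t, false, false, b, true⟩ (j : Int) '+' =
          ⟨r, t ++ ['+'], false, false, b, true⟩ := by
        simp [pvStepA, hcheck]
      rw [hstep]
      have hlt : j + 1 < l.length := by
        obtain ⟨h, _⟩ := List.getElem?_eq_some_iff.mp hnext
        exact h
      rw [hcast]
      exact ih (j + 1) (t ++ ['+']) r b hlt hnext (by omega)
    · -- run ends: flush at j + 1
      have hcheck : pvQuantCheck l (j : Int) = true := by
        unfold pvQuantCheck
        rw [hcast, PySem.List.pyGet?_natCast]
        cases hv : l[j + 1]? with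
        | none => rfl
        | some ch =>
          have : ch ≠ '+' := fun he => hnext (he ▸ hv)
          simpa using this
      have hstep : pvStepA l ⟨r, t, false, false, b, true⟩ (j : Int) '+' =
          ⟨r ++ pvTranspileA (t ++ ['+']) b, [], false, false, b, false⟩ := by
        simp [pvStepA, hcheck]
      rw [hstep]
      have hscan : pvScanPlus l (j + 1) (t ++ ['+']) fuel = (t ++ ['+'], j + 1) := by
        cases fuel with
        | zero =>
          have : j + 1 = l.length := by omega
          rfl
        | succ fuel =>
          rw [pvScanPlus]
          by_cases hl2 : j + 1 < l.length
          · have : l[j + 1] ≠ '+' := by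
              intro he
              exact hnext (by rw [List.getElem?_eq_getElem hl2, he])
            simp [hl2, this]
          · simp [hl2]
      rw [hscan, hcast]


-- main loop correspondence: A in its neutral state at position i equals B from i
theorem pvMain (l : List Char) (fuel : Nat) : ∀ (i : Nat) (r : List Char) (b : Bool),
    i ≤ l.length → l.length - i < fuel →
    pvLoopA l (PySem.List.enumerate (l.drop i) i) ⟨r, [], false, false, b, false⟩ =
      pvLoopB l i b r fuel := by
  induction fuel with
  | zero => intro i r b h1 h2; omega
  | succ fuel ih =>
    intro i r b h1 h2
    rw [pvLoopB]
    by_cases hi : i < l.length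
    swap
    · have : i = l.length := by omega
      subst this
      simp [pvLoopA, List.drop_length]
    rw [List.drop_eq_getElem_cons hi, PySem.List.enumerate_cons, pvLoopA]
    simp only [hi, dif_pos]
    have hcast : ((i : Int) + 1) = ((i + 1 : Nat) : Int) := by push_cast; ring
    by_cases hws : l[i] ∈ pvWS
    · -- whitespace: skipped by both
      have hstep : pvStepA l ⟨r, [], false, false, b, false⟩ (i : Int) l[i] =
          ⟨r, [], false, false, b, false⟩ := by
        simp [pvStepA, hws]
      rw [hstep, hcast, if_pos hws]
      exact ih (i + 1) r b (by omega) (by omega)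
    rw [if_neg hws]
    have hws' : ¬l[i] = ' ' ∧ ¬l[i] = '\n' ∧ ¬l[i] = '\t' := by
      simpa [pvWS] using hws
    by_cases hq : l[i] = '"'
    · -- quoted literal
      have hstep : pvStepA l ⟨r, [], false, false, b, false⟩ (i : Int) l[i] =
          ⟨r, [], true, false, b, false⟩ := by
        simp [pvStepA, hq, pvWS]
      rw [hstep, hcast, if_pos hq]
      rw [pvExactA l l.length (i + 1) [] r b (by omega) (by omega)]
      have hb := pvScanQuote_bounds l l.length (i + 1) [] (by omega) (by omega)
      by_cases hp2 : (pvScanQuote l (i + 1) [] l.length).2 = l.length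
      · rw [if_pos hp2, if_pos hp2]
      · rw [if_neg hp2, if_neg hp2, pvEscape_eq]
        exact ih ((pvScanQuote l (i + 1) [] l.length).2 + 1)
          (r ++ pvEscapeB (pvScanQuote l (i + 1) [] l.length).1) b (by omega) (by omega)
    rw [if_neg hq]
    by_cases hnot : l[i] = '!' ∧ PySem.List.pyGet? l ((i : Int) - 1) ≠ some '['
    · -- '!' sets is_not
      have hstep : pvStepA l ⟨r, [], false, false, b, false⟩ (i : Int) l[i] =
          ⟨r, [], false, false, true, false⟩ := by
        obtain ⟨hc1, hc2⟩ := hnot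
        simp [pvStepA, hc1, hc2, pvWS]
      rw [hstep, hcast, if_pos hnot]
      exact ih (i + 1) r true (by omega) (by omega)
    rw [if_neg hnot]
    by_cases hqu : (l[i] = '0' ∨ l[i] = '1') ∧ l[i + 1]? = some '+'
    · -- quantifier token
      obtain ⟨hqa, hqb⟩ := hqu
      have hlt2 : i + 1 < l.length := by
        obtain ⟨h, _⟩ := List.getElem?_eq_some_iff.mp hqb
        omega
      have hquA : (l[i] = '0' ∨ l[i] = '1') ∧ PySem.List.pyGet? l ((i : Int) + 1) = some '+' := by
        refine ⟨hqa, ?_⟩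
        rw [hcast, PySem.List.pyGet?_natCast]
        exact hqb
      have hstep : pvStepA l ⟨r, [], false, false, b, false⟩ (i : Int) l[i] =
          ⟨r, [l[i]], false, false, b, true⟩ := by
        simp [pvStepA, hws', hq, hnot, hquA, pvWS]
      rw [hstep, hcast]
      rw [pvQuantA l l.length (i + 1) [l[i]] r b hlt2 hqb (by omega)]
      have hb := pvScanPlus_bounds l l.length (i + 1) [l[i]] (by omega) (by omega)
      rw [if_pos ⟨hqa, hlt2, hqb⟩, pvTranspile_eq]
      exact ih (pvScanPlus l (i + 1) [l[i]] l.length).2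
        (r ++ pvTranspileB (pvScanPlus l (i + 1) [l[i]] l.length).1 b) b (by omega) (by omega)
    have hqu' : ¬ ((l[i] = '0' ∨ l[i] = '1') ∧ i + 1 < l.length ∧ l[i + 1]? = some '+') := by
      intro ⟨ha, _, hc⟩; exact hqu ⟨ha, hc⟩
    rw [if_neg hqu']
    by_cases hlast : i + 1 < l.length
    · -- a next character exists
      have hnu : PySem.List.pyGet? l ((i : Int) + 1) = some l[i + 1] := by
        rw [hcast, PySem.List.pyGet?_natCast, List.getElem?_eq_getElem hlast]
      have hAlt : (i : Int) < (l.length : Int) - 1 := by omega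
      have hquA : ¬ ((l[i] = '0' ∨ l[i] = '1') ∧ PySem.List.pyGet? l ((i : Int) + 1) = some '+') := by
        intro ⟨ha, hc⟩
        rw [hcast, PySem.List.pyGet?_natCast] at hc
        exact hqu ⟨ha, hc⟩
      have hget1 : l[i + 1]? = some l[i + 1] := List.getElem?_eq_getElem hlast
      have hcast2 : ((i : Int) + 1) + 1 = ((i + 2 : Nat) : Int) := by push_cast; ring
      by_cases hpair : (l[i] ∈ ['-', 's', 'w'] ∧ l[i + 1] = '>') ∨ (l[i] = '<' ∧ l[i + 1] ∈ ['-', 's', 'w'])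
      · -- two-character token
        have hstep : pvStepA l ⟨r, [], false, false, b, false⟩ (i : Int) l[i] =
            ⟨r ++ pvTranspileA [l[i], l[i + 1]] b, [], false, true, b, false⟩ := by
          simp only [pvStepA]
          simp [hws', hq, hnot, hAlt, hnu, pvWS]
          have hq2 : ¬ ((l[i] = '0' ∨ l[i] = '1') ∧ l[i + 1] = '+') := by
            intro ⟨ha, hc⟩
            exact hqu ⟨ha, by rw [hget1, hc]⟩
          rw [if_neg hq2, if_pos (by simpa using hpair)]
        rw [hstep, hcast, List.drop_eq_getElem_cons hlast, PySem.List.enumerate_cons, pvLoopA]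
        have hstep2 : pvStepA l ⟨r ++ pvTranspileA [l[i], l[i + 1]] b, [], false, true, b, false⟩
            ((i + 1 : Nat) : Int) l[i + 1] =
            ⟨r ++ pvTranspileA [l[i], l[i + 1]] b, [], false, false, b, false⟩ := by
          simp [pvStepA]
        rw [hstep2]
        have hpairB : i + 1 < l.length ∧
            ((l[i] ∈ ['-', 's', 'w'] ∧ l[i + 1]? = some '>') ∨ (l[i] = '<' ∧ l[i + 1]? ∈ [some '-', some 's', some 'w'])) := by
          refine ⟨hlast, ?_⟩
          rw [hget1]
          simpa using hpair
        rw [if_pos hpairB, hget1]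
        simp only [Option.getD_some]
        rw [pvTranspile_eq]
        rw [show ((i + 1 : Nat) : Int) + 1 = ((i + 2 : Nat) : Int) by push_cast; ring]
        exact ih (i + 2) (r ++ pvTranspileB [l[i], l[i + 1]] b) b (by omega) (by omega)
      · -- single character
        have hstep : pvStepA l ⟨r, [], false, false, b, false⟩ (i : Int) l[i] =
            ⟨r ++ pvTranspileA [l[i]] b, [], false, false, b, false⟩ := by
          simp only [pvStepA]
          simp [hws', hq, hnot, hAlt, hnu, pvWS]
          have hq2 : ¬ ((l[i] = '0' ∨ l[i] = '1') ∧ l[i + 1] = '+') := by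
            intro ⟨ha, hc⟩
            exact hqu ⟨ha, by rw [hget1, hc]⟩
          rw [if_neg hq2, if_neg (fun hc => hpair (by simpa using hc))]
        have hpairB : ¬ (i + 1 < l.length ∧
            ((l[i] ∈ ['-', 's', 'w'] ∧ l[i + 1]? = some '>') ∨ (l[i] = '<' ∧ l[i + 1]? ∈ [some '-', some 's', some 'w']))) := by
          intro ⟨_, hc⟩
          rw [hget1] at hc
          refine hpair ?_
          simpa using hc
        rw [hstep, hcast, if_neg hpairB, pvTranspile_eq]
        exact ih (i + 1) (r ++ pvTranspileB [l[i]] b) b (by omega) (by omega)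
    · -- last character of the expression
      have hA : ¬ ((i : Int) < (l.length : Int) - 1) := by
        omega
      have hquA : ¬ ((l[i] = '0' ∨ l[i] = '1') ∧ PySem.List.pyGet? l ((i : Int) + 1) = some '+') := by
        intro ⟨ha, hc⟩
        rw [hcast, PySem.List.pyGet?_natCast] at hc
        obtain ⟨h, _⟩ := List.getElem?_eq_some_iff.mp hc
        omega
      have hstep : pvStepA l ⟨r, [], false, false, b, false⟩ (i : Int) l[i] =
          ⟨r ++ pvTranspileA [l[i]] b, [], false, false, b, false⟩ := by
        simp only [pvStepA]
        simp [hws', hq, hnot, hquA, hA, pvWS]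
      have hpairB : ¬ (i + 1 < l.length ∧
          ((l[i] ∈ ['-', 's', 'w'] ∧ l[i + 1]? = some '>') ∨ (l[i] = '<' ∧ l[i + 1]? ∈ [some '-', some 's', some 'w']))) := by
        intro ⟨h, _⟩; omega
      rw [hstep, hcast, if_neg hpairB, pvTranspile_eq]
      exact ih (i + 1) (r ++ pvTranspileB [l[i]] b) b (by omega) (by omega)


-- ===== VERDICT (by name: the statement is the Claim_ definition above) =====
theorem parse_spec : Claim_equal_parse := by
  intro expr _ _
  unfold Spec_parse parse parse_alt
  have h := pvMain expr.toList (expr.toList.length + 1) 0 [] false (Nat.zero_le _) (by omega)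
  simpa using congrArg String.ofList h
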